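-- pv_equiv track=rewrite | github.com/patrikpusztai10/Convex-Hull-of-Line-Intersections | convexhull.py | low_yPoint
-- ===== SOURCE A (Python) =====
-- def low_yPoint(points):
--     min=0
--     for i in range(1, len(points)):
--         inter_x,inter_y=points[i]
--         min_x,min_y=points[min]
--         if inter_y<min_y:
--             min=i
--         elif inter_y==min_y and inter_x>min_x:
--             min=i
--     return min
-- ===== SOURCE B (Python) =====
-- def low_yPoint(points):
--     # divide and conquer: best index of points[lo:hi] (lowest y, tie: largest x, tie: leftmost)
--     def best(lo, hi):
--         if hi - lo <= 1:
--             return lo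
--         mid = (lo + hi) // 2
--         l = best(lo, mid)
--         r = best(mid, hi)
--         (lx, ly), (rx, ry) = points[l], points[r]
--         return r if ry < ly or (ry == ly and rx > lx) else l
--     return best(0, len(points))
-- ===== Notes on version B (the rewrite author's own statement) =====
-- stated objective: alternative
-- what changed: B replaces A's single left-to-right index-tracking scan with a recursive divide-and-conquer: it finds the best index of each half and combines the two candidates (right wins only if strictly better), which is correct because the 'lowest y, tie largest x, tie leftmost' selection is associative over concatenation.
import Mathlib
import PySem

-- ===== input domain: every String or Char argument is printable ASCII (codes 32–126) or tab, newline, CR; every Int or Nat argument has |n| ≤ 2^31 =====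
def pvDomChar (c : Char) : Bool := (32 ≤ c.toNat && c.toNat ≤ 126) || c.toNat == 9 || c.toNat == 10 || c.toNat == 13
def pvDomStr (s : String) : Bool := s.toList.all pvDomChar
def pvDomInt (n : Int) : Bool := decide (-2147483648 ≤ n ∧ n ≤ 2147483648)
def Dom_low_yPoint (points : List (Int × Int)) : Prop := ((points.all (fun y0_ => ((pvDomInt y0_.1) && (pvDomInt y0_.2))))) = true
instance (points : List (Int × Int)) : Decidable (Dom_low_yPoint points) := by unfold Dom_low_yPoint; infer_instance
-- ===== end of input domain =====

-- B replaces A's left-to-right index-tracking scan with a divide-and-conquer recursion over index halves; same O(n) result, a genuinely different traversal.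

-- ===== PORT A =====
def low_yPoint (points : List (Int × Int)) : Int :=
  (PySem.List.pyRange 1 (points.length : Int) 1).foldl
    (fun mn i =>
      let ixy := PySem.List.pyGetD points i (0, 0)   -- inter_x, inter_y = points[i]  (index always in range)
      let mxy := PySem.List.pyGetD points mn (0, 0)  -- min_x, min_y = points[min]    (index always in range)
      if ixy.2 < mxy.2 then i
      else if ixy.2 = mxy.2 ∧ ixy.1 > mxy.1 then i
      else mn)
    0

-- ===== PORT B =====
-- inner helper 'best(lo, hi)': best index of points[lo:hi] (lowest y, tie: largest x, tie: leftmost)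
def pvBest (points : List (Int × Int)) (lo hi : Int) : Int :=
  if hi - lo ≤ 1 then lo
  else
    let l := pvBest points lo (PySem.Int.floordiv (lo + hi) 2)
    let r := pvBest points (PySem.Int.floordiv (lo + hi) 2) hi
    let lp := PySem.List.pyGetD points l (0, 0)
    let rp := PySem.List.pyGetD points r (0, 0)
    if rp.2 < lp.2 ∨ (rp.2 = lp.2 ∧ rp.1 > lp.1) then r else l
termination_by (hi - lo).toNat
decreasing_by
  all_goals
    have h1 : lo + 1 ≤ PySem.Int.floordiv (lo + hi) 2 :=
      (PySem.Int.le_floordiv_iff_mul_le (by omega)).mpr (by omega)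
    have h2 : PySem.Int.floordiv (lo + hi) 2 < hi :=
      (PySem.Int.floordiv_lt_iff_lt_mul (by omega)).mpr (by omega)
    omega

def low_yPoint_alt (points : List (Int × Int)) : Int :=
  pvBest points 0 (points.length : Int)

-- ===== PRECONDITION & SPEC =====
def Spec_low_yPoint (points : List (Int × Int)) (out : Int) : Prop := out = low_yPoint_alt points
instance (points : List (Int × Int)) (out : Int) : Decidable (Spec_low_yPoint points out) := by unfold Spec_low_yPoint; infer_instance

-- ===== CLAIM (what is proved, stated in full; the proofs are below) =====
def Claim_equal_low_yPoint : Prop := ∀ (points : List (Int × Int)), Dom_low_yPoint points → Spec_low_yPoint points (low_yPoint points)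

-- ===== LEMMAS AND PROOFS =====

-- "p is a strictly better lowest point than m" (lower y, tie: larger x)
abbrev pvBetter (p m : Int × Int) : Prop := p.2 < m.2 ∨ (p.2 = m.2 ∧ m.1 < p.1)

lemma pvBetter_irrefl (a : Int × Int) : ¬ pvBetter a a := by
  unfold pvBetter; omega

lemma pvBetter_trans {a b c : Int × Int} (h1 : pvBetter a b) (h2 : pvBetter b c) : pvBetter a c := by
  unfold pvBetter at *; omega

lemma pvBetter_of_not {a b c : Int × Int} (h1 : pvBetter a b) (h2 : ¬ pvBetter c b) : pvBetter a c := by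
  unfold pvBetter at *; omega

lemma pvNotBetter_trans {a b c : Int × Int} (h1 : ¬ pvBetter a b) (h2 : ¬ pvBetter b c) : ¬ pvBetter a c := by
  unfold pvBetter at *; omega

-- points[i] as both programs read it (indices are always in range where used)
def pvP (points : List (Int × Int)) (i : Int) : Int × Int := PySem.List.pyGetD points i (0, 0)

-- "r is the answer on the index interval [lo, hi)": in range, strictly better than everything
-- before it, and nothing in the interval strictly better than it
def pvCharI (points : List (Int × Int)) (lo hi r : Int) : Prop :=
  lo ≤ r ∧ r < hi ∧
  (∀ k, lo ≤ k → k < r → pvBetter (pvP points r) (pvP points k)) ∧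
  (∀ k, lo ≤ k → k < hi → ¬ pvBetter (pvP points k) (pvP points r))

lemma pvCharI_unique {points : List (Int × Int)} {lo hi r r' : Int}
    (h : pvCharI points lo hi r) (h' : pvCharI points lo hi r') : r = r' := by
  obtain ⟨hr1, hr2, hr3, hr4⟩ := h
  obtain ⟨hr1', hr2', hr3', hr4'⟩ := h'
  by_contra hne
  rcases lt_or_gt_of_ne hne with hlt | hgt
  · exact hr4 r' hr1' hr2' (hr3' r hr1 hlt)
  · exact hr4' r hr1 hr2 (hr3 r' hr1' hgt)

-- B's recursion satisfies the characterisation on every nonempty interval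
lemma pvBest_char : ∀ (n : Nat) (points : List (Int × Int)) (lo hi : Int),
    (hi - lo).toNat = n → lo < hi → pvCharI points lo hi (pvBest points lo hi) := by
  intro n
  induction n using Nat.strong_induction_on with
  | _ n ih =>
    intro points lo hi hn hlt
    rw [pvBest]
    by_cases hbase : hi - lo ≤ 1
    · rw [if_pos hbase]
      refine ⟨le_refl lo, hlt, ?_, ?_⟩
      · intro k hk1 hk2; omega
      · intro k hk1 hk2
        have : k = lo := by omega
        rw [this]; exact pvBetter_irrefl _
    · rw [if_neg hbase]
      have hmid1 : lo + 1 ≤ PySem.Int.floordiv (lo + hi) 2 :=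
        (PySem.Int.le_floordiv_iff_mul_le (by omega)).mpr (by omega)
      have hmid2 : PySem.Int.floordiv (lo + hi) 2 < hi :=
        (PySem.Int.floordiv_lt_iff_lt_mul (by omega)).mpr (by omega)
      set mid := PySem.Int.floordiv (lo + hi) 2 with hmid
      have Cl := ih (mid - lo).toNat (by omega) points lo mid rfl (by omega)
      have Cr := ih (hi - mid).toNat (by omega) points mid hi rfl (by omega)
      set l := pvBest points lo mid with hl
      set r := pvBest points mid hi with hr
      obtain ⟨l1, l2, l3, l4⟩ := Cl
      obtain ⟨r1, r2, r3, r4⟩ := Cr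
      by_cases hc : (PySem.List.pyGetD points r (0, 0)).2 < (PySem.List.pyGetD points l (0, 0)).2 ∨
          ((PySem.List.pyGetD points r (0, 0)).2 = (PySem.List.pyGetD points l (0, 0)).2 ∧
           (PySem.List.pyGetD points r (0, 0)).1 > (PySem.List.pyGetD points l (0, 0)).1)
      · -- right candidate strictly better: result r
        rw [if_pos hc]
        have hb : pvBetter (pvP points r) (pvP points l) := by
          unfold pvBetter pvP; omega
        refine ⟨by omega, r2, ?_, ?_⟩
        · intro k hk1 hk2
          by_cases hkm : k < mid
          · by_cases hkl : k < l
            · exact pvBetter_trans hb (l3 k hk1 hkl)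
            · exact pvBetter_of_not hb (l4 k hk1 hkm)
          · exact r3 k (by omega) hk2
        · intro k hk1 hk2
          by_cases hkm : k < mid
          · intro hkr
            exact l4 k hk1 hkm (pvBetter_trans hkr hb)
          · exact r4 k (by omega) hk2
      · -- left candidate stands: result l
        rw [if_neg hc]
        have hnb : ¬ pvBetter (pvP points r) (pvP points l) := by
          unfold pvBetter pvP; omega
        refine ⟨l1, by omega, ?_, ?_⟩
        · intro k hk1 hk2
          exact l3 k hk1 hk2
        · intro k hk1 hk2
          by_cases hkm : k < mid
          · exact l4 k hk1 hkm
          · exact pvNotBetter_trans (r4 k (by omega) hk2) hnb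

-- reference loop for A: walk the tail with current position j, best value m at index mi
def pvLoop : List (Int × Int) → Nat → (Int × Int) → Nat → (Int × Int) × Nat
  | [], _, m, mi => (m, mi)
  | p :: t, j, m, mi =>
      if pvBetter p m then pvLoop t (j + 1) p j else pvLoop t (j + 1) m mi

-- A's index fold equals the reference loop
lemma pvLemA : ∀ (t pre : List (Int × Int)) (m : Int × Int) (mi : Nat),
    mi < pre.length → (pre ++ t)[mi]? = some m →
    (PySem.List.pyRange (pre.length : Int) (((pre ++ t).length : Nat) : Int) 1).foldl
      (fun mn i =>
        let ixy := PySem.List.pyGetD (pre ++ t) i (0, 0)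
        let mxy := PySem.List.pyGetD (pre ++ t) mn (0, 0)
        if ixy.2 < mxy.2 then i
        else if ixy.2 = mxy.2 ∧ ixy.1 > mxy.1 then i
        else mn)
      (mi : Int)
    = ((pvLoop t pre.length m mi).2 : Int) := by
  intro t
  induction t with
  | nil =>
    intro pre m mi _ _
    rw [PySem.List.pyRange_one_eq_nil (by simp)]
    simp [pvLoop]
  | cons p t ih =>
    intro pre m mi hmi hm
    have hcons : pre ++ p :: t = (pre ++ [p]) ++ t := by simp
    have hlt : (pre.length : Int) < (((pre ++ p :: t).length : Nat) : Int) := by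
      simp
    rw [PySem.List.pyRange_one_cons hlt, List.foldl_cons]
    have hgp : PySem.List.pyGetD (pre ++ p :: t) (pre.length : Int) (0, 0) = p := by
      rw [PySem.List.pyGetD_natCast]
      simp [List.getD]
    have hgm : PySem.List.pyGetD (pre ++ p :: t) (mi : Int) (0, 0) = m := by
      rw [PySem.List.pyGetD_natCast]
      simp [List.getD, hm]
    simp only [hgp, hgm]
    have hs : (pre ++ [p]).length = pre.length + 1 := by simp
    have hstart : ((pre.length : Nat) : Int) + 1 = (((pre ++ [p]).length : Nat) : Int) := by
      simp
    by_cases hb : pvBetter p m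
    · have hcond : (if p.2 < m.2 then (pre.length : Int)
          else if p.2 = m.2 ∧ p.1 > m.1 then (pre.length : Int) else (mi : Int)) = (pre.length : Int) := by
        unfold pvBetter at hb; split_ifs <;> omega
      rw [hcond]
      have hih := ih (pre ++ [p]) p pre.length (by simp)
        (by rw [← hcons]; simp)
      rw [hcons, hstart, hih]
      simp [pvLoop, hb, hs]
    · have hcond : (if p.2 < m.2 then (pre.length : Int)
          else if p.2 = m.2 ∧ p.1 > m.1 then (pre.length : Int) else (mi : Int)) = (mi : Int) := by
        unfold pvBetter at hb; split_ifs <;> omega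
      rw [hcond]
      have hih := ih (pre ++ [p]) m mi (by rw [hs]; omega) (by rw [← hcons]; exact hm)
      rw [hcons, hstart, hih]
      simp [pvLoop, hb]

-- invariant of the reference loop: result value sits at result index, everything before it is strictly worse,
-- and nothing in the list is strictly better
lemma pvLemInv : ∀ (t pre : List (Int × Int)) (m : Int × Int) (mi : Nat),
    mi < pre.length → (pre ++ t)[mi]? = some m →
    (∀ k, k < mi → ∀ q, (pre ++ t)[k]? = some q → pvBetter m q) →
    (∀ q ∈ pre, ¬ pvBetter q m) →
    ((pre ++ t)[(pvLoop t pre.length m mi).2]? = some (pvLoop t pre.length m mi).1)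
    ∧ (∀ k, k < (pvLoop t pre.length m mi).2 → ∀ q, (pre ++ t)[k]? = some q → pvBetter (pvLoop t pre.length m mi).1 q)
    ∧ (∀ q ∈ pre ++ t, ¬ pvBetter q (pvLoop t pre.length m mi).1) := by
  intro t
  induction t with
  | nil =>
    intro pre m mi hmi hm h2 h4
    refine ⟨hm, h2, ?_⟩
    intro q hq
    exact h4 q (by simpa using hq)
  | cons p t ih =>
    intro pre m mi hmi hm h2 h4
    have hcons : pre ++ p :: t = (pre ++ [p]) ++ t := by simp
    have hself : (pre ++ p :: t)[pre.length]? = some p := by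
      simp
    by_cases hb : pvBetter p m
    · -- new best p at index pre.length
      have res := ih (pre ++ [p]) p pre.length (by simp)
        (by rw [← hcons]; exact hself)
        (by
          intro k hk q hq
          rw [← hcons] at hq
          have hqpre : q ∈ pre := by
            have hk' : k < pre.length := hk
            have := List.getElem?_append_left (l₂ := p :: t) hk'
            rw [this] at hq
            exact List.mem_of_getElem? hq
          exact pvBetter_of_not hb (h4 q hqpre))
        (by
          intro q hq
          rcases List.mem_append.mp hq with hq | hq
          · intro hqp
            exact h4 q hq (pvBetter_trans hqp hb)
          · simp at hq; rw [hq]; exact pvBetter_irrefl p)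
      rw [hcons]
      simpa [pvLoop, hb] using res
    · -- keep best m at index mi
      have res := ih (pre ++ [p]) m mi (by simp; omega)
        (by rw [← hcons]; exact hm)
        (by intro k hk q hq; rw [← hcons] at hq; exact h2 k hk q hq)
        (by
          intro q hq
          rcases List.mem_append.mp hq with hq | hq
          · exact h4 q hq
          · simp at hq; rw [hq]; exact hb)
      rw [hcons]
      simpa [pvLoop, hb] using res

-- A's result satisfies the characterisation on [0, n)
lemma pvP_toNat (points : List (Int × Int)) (k : Int) (h0 : 0 ≤ k) (h : k.toNat < points.length) :
    pvP points k = points[k.toNat]'h := by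
  obtain ⟨n, rfl⟩ := Int.eq_ofNat_of_zero_le h0
  unfold pvP
  rw [PySem.List.pyGetD_natCast]
  simp only [Int.toNat_natCast] at h
  simp [List.getD, List.getElem?_eq_getElem h]

lemma pvA_char (x : Int × Int) (t : List (Int × Int)) :
    pvCharI (x :: t) 0 ((x :: t).length : Int) (low_yPoint (x :: t)) := by
  have hA : low_yPoint (x :: t) = ((pvLoop t 1 x 0).2 : Int) := by
    have := pvLemA t [x] x 0 (by simp) (by simp)
    unfold low_yPoint
    simpa using this
  have inv := pvLemInv t [x] x 0 (by simp) (by simp)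
    (by intro k hk; omega)
    (by intro q hq; simp at hq; rw [hq]; exact pvBetter_irrefl x)
  set mi := (pvLoop t 1 x 0).2 with hmi
  set m := (pvLoop t 1 x 0).1 with hm
  have i1 : (x :: t)[mi]? = some m := inv.1
  have i2 : ∀ k, k < mi → ∀ q, (x :: t)[k]? = some q → pvBetter m q := inv.2.1
  have i3 : ∀ q ∈ x :: t, ¬ pvBetter q m := inv.2.2
  have hlen : mi < (x :: t).length := (List.getElem?_eq_some_iff.mp i1).1
  have hPmi : pvP (x :: t) (mi : Int) = m := by
    have := pvP_toNat (x :: t) (mi : Int) (by omega) (by simpa using hlen)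
    rw [this]
    have : (x :: t)[(((mi : Int)).toNat)]? = some m := by simpa using i1
    simpa using List.getElem?_eq_some_iff.mp this |>.2
  rw [hA]
  refine ⟨by omega, by exact_mod_cast hlen, ?_, ?_⟩
  · intro k hk1 hk2
    have hkn : k.toNat < mi := by omega
    have hPk := pvP_toNat (x :: t) k hk1 (by omega)
    rw [hPmi, hPk]
    exact i2 k.toNat hkn _ (by simp)
  · intro k hk1 hk2
    have hklen : k.toNat < (x :: t).length := by omega
    have hPk := pvP_toNat (x :: t) k hk1 hklen
    rw [hPmi, hPk]
    exact i3 _ (List.getElem_mem hklen)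

-- ===== VERDICT (by name: the statement is the Claim_ definition above) =====
theorem low_yPoint_spec : Claim_equal_low_yPoint := by
  intro points _
  unfold Spec_low_yPoint
  cases points with
  | nil =>
    unfold low_yPoint low_yPoint_alt
    rw [pvBest]
    simp [PySem.List.pyRange]
  | cons x t =>
    have hA := pvA_char x t
    have hB := pvBest_char (((x :: t).length : Int) - 0).toNat (x :: t) 0 ((x :: t).length : Int)
      rfl (by simp)
    exact pvCharI_unique hA hB
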